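-- pv_equiv track=rewrite | github.com/felixschloesser/boardgame-recommender | cli/src/boardgames_cli/utils/validation.py | format_missing
-- ===== SOURCE A (Python) =====
-- from typing import Sequence
--
-- def levenshtein(left: str, right: str) -> int:
--     """
--     Classic Levenshtein distance for fuzzy matching.
--     """
--     if left == right:
--         return 0
--     if not left:
--         return len(right)
--     if not right:
--         return len(left)
--
--     previous_row = list(range(len(right) + 1))
--     for i, char_left in enumerate(left, start=1):
--         current_row = [i]
--         for j, char_right in enumerate(right, start=1):
--             insertions = previous_row[j] + 1
--             deletions = current_row[j - 1] + 1
--             substitutions = previous_row[j - 1] + (char_left != char_right)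
--             current_row.append(min(insertions, deletions, substitutions))
--         previous_row = current_row
--     return previous_row[-1]
--
-- def suggestions(target: str, candidates: Sequence[str], limit: int = 3) -> list[str]:
--     """
--     Suggest closest catalog entries to a missing game name.
--     """
--     normalized = [
--         (candidate, levenshtein(target.lower(), candidate.lower()))
--         for candidate in candidates
--         if isinstance(candidate, str) and candidate
--     ]
--     normalized.sort(key=lambda item: item[1])
--     return [name for name, _ in normalized[:limit]]
--
-- def format_missing(names: Sequence[str], catalog: Sequence[str], prefix: str) -> str:
--     """
--     Build a descriptive error message listing missing names and nearest neighbors.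
--     """
--     explanations: list[str] = []
--     for name in names:
--         nearest = suggestions(name, catalog)
--         if nearest:
--             explanations.append(f"'{name}' (closest: {', '.join(nearest)})")
--         else:
--             explanations.append(f"'{name}'")
--     return f"{prefix}: {'; '.join(explanations)}"
-- ===== SOURCE B (Python) =====
-- from typing import Sequence
--
--
-- def levenshtein(left: str, right: str) -> int:
--     """Levenshtein distance via top-down memoized recursion over index pairs."""
--     if left == right:
--         return 0
--     if not left:
--         return len(right)
--     if not right:
--         return len(left)
--
--     memo: dict[tuple[int, int], int] = {}
--
--     def rec(i: int, j: int) -> int: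
--         # distance between left[:i] and right[:j]
--         if i == 0:
--             return j
--         if j == 0:
--             return i
--         if (i, j) not in memo:
--             cost = 0 if left[i - 1] == right[j - 1] else 1
--             memo[(i, j)] = min(rec(i - 1, j) + 1,
--                                min(rec(i, j - 1) + 1, rec(i - 1, j - 1) + cost))
--         return memo[(i, j)]
--
--     return rec(len(left), len(right))
--
--
-- def suggestions(target: str, candidates: Sequence[str], limit: int = 3) -> list[str]:
--     t = target.lower()
--     ranked = sorted(
--         [(c, levenshtein(t, c.lower())) for c in candidates if isinstance(c, str) and c],
--         key=lambda p: p[1],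
--     )
--     return [c for c, _ in ranked[:limit]]
--
--
-- def _describe(name: str, catalog: Sequence[str]) -> str:
--     nearest = suggestions(name, catalog)
--     if nearest:
--         return f"'{name}' (closest: {', '.join(nearest)})"
--     return f"'{name}'"
--
--
-- def format_missing(names: Sequence[str], catalog: Sequence[str], prefix: str) -> str:
--     return f"{prefix}: " + "; ".join(_describe(n, catalog) for n in names)
-- ===== Notes on version B (the rewrite author's own statement) =====
-- stated objective: alternative
-- what changed: levenshtein is recomputed as a top-down memoized recursion rec(i,j) over index pairs instead of A's bottom-up row-by-row DP table build, and format_missing becomes a join over a per-name describe helper instead of an accumulator loop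
import Mathlib
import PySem

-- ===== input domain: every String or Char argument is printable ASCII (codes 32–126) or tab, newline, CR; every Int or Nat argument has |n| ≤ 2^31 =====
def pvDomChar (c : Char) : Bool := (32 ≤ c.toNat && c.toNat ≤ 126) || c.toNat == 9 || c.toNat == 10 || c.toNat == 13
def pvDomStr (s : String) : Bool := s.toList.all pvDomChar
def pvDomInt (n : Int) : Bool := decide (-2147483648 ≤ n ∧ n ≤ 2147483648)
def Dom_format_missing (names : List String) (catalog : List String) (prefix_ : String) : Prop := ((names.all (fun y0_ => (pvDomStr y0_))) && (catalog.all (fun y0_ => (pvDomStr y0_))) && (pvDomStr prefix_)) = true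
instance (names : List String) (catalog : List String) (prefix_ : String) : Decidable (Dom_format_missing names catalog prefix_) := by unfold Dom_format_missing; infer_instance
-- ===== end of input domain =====

-- B replaces A's bottom-up row DP for levenshtein by a top-down recursion over index pairs
-- (memoized in Python) and rebuilds format_missing as a join over a per-name helper; same values.


-- ===== PORT A =====
-- inner loop body of A's levenshtein: one cell of current_row
def stepA (prev : List Nat) (cl : Char) (cu : List Nat × Nat) (cr : Char) : List Nat × Nat :=
  let current := cu.1
  let j := cu.2
  let insertions := prev.getD j 0 + 1
  let deletions := current.getD (j - 1) 0 + 1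
  let substitutions := prev.getD (j - 1) 0 + (if cl ≠ cr then 1 else 0)
  (current ++ [min insertions (min deletions substitutions)], j + 1)

-- outer loop body of A's levenshtein: builds current_row from previous_row
def outerA (r : List Char) (st : List Nat × Nat) (cl : Char) : List Nat × Nat :=
  ((r.foldl (stepA st.1 cl) ([st.2], 1)).1, st.2 + 1)

def levenshteinA (left right : String) : Nat :=
  let l := left.toList
  let r := right.toList
  if l = r then 0
  else if l = [] then r.length
  else if r = [] then l.length
  else ((l.foldl (outerA r) (List.range (r.length + 1), 1)).1).getLast?.getD 0

def suggestionsA (target : String) (candidates : List String) (limit : Nat) : List String :=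
  let normalized := (candidates.filter (fun c => c ≠ "")).map
    (fun c => (c, levenshteinA (PySem.Str.lower target) (PySem.Str.lower c)))
  let sortedL := PySem.List.sorted normalized (fun item => item.2) false
  (sortedL.take limit).map (fun p => p.1)

def format_missing (names : List String) (catalog : List String) (prefix_ : String) : String :=
  let explanations := names.foldl (fun acc name =>
    let nearest := suggestionsA name catalog 3
    acc ++ [if nearest ≠ [] then
              "'" ++ name ++ "' (closest: " ++ PySem.Str.join ", " nearest ++ ")"
            else "'" ++ name ++ "'"]) []
  prefix_ ++ ": " ++ PySem.Str.join "; " explanations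

-- ===== PORT B =====
-- B's rec(i, j): distance between left[:i] and right[:j], memoized in the threaded dict
def levM (l r : List Char) : Nat → Nat → PySem.Dict (Nat × Nat) Nat → Nat × PySem.Dict (Nat × Nat) Nat
  | 0, j, memo => (j, memo)
  | i + 1, 0, memo => (i + 1, memo)
  | i + 1, j + 1, memo =>
      match memo.get? (i + 1, j + 1) with
      | some v => (v, memo)
      | none =>
          let cost := if l.getD i ' ' = r.getD j ' ' then 0 else 1
          let a := levM l r i (j + 1) memo
          let b := levM l r (i + 1) j a.2
          let c := levM l r i j b.2
          let v := min (a.1 + 1) (min (b.1 + 1) (c.1 + cost))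
          (v, c.2.insert (i + 1, j + 1) v)
  termination_by i j _ => (i, j)

def levenshteinB (left right : String) : Nat :=
  let l := left.toList
  let r := right.toList
  if l = r then 0
  else if l = [] then r.length
  else if r = [] then l.length
  else (levM l r l.length r.length PySem.Dict.empty).1

def suggestionsB (target : String) (candidates : List String) (limit : Nat) : List String :=
  let t := PySem.Str.lower target
  let ranked := PySem.List.sorted
    ((candidates.filter (fun c => c ≠ "")).map (fun c => (c, levenshteinB t (PySem.Str.lower c))))
    (fun p => p.2) false
  (ranked.take limit).map (fun p => p.1)

def describeB (name : String) (catalog : List String) : String :=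
  let nearest := suggestionsB name catalog 3
  if nearest ≠ [] then
    "'" ++ name ++ "' (closest: " ++ PySem.Str.join ", " nearest ++ ")"
  else "'" ++ name ++ "'"

def format_missing_alt (names : List String) (catalog : List String) (prefix_ : String) : String :=
  prefix_ ++ ": " ++ PySem.Str.join "; " (names.map (fun n => describeB n catalog))

-- ===== PRECONDITION & SPEC =====
def Spec_format_missing (names : List String) (catalog : List String) (prefix_ : String) (out : String) : Prop := out = format_missing_alt names catalog prefix_
instance (names : List String) (catalog : List String) (prefix_ : String) (out : String) : Decidable (Spec_format_missing names catalog prefix_ out) := by unfold Spec_format_missing; infer_instance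

-- ===== CLAIM (what is proved, stated in full; the proofs are below) =====
def Claim_equal_format_missing : Prop := ∀ (names : List String) (catalog : List String) (prefix_ : String), Dom_format_missing names catalog prefix_ → Spec_format_missing names catalog prefix_ (format_missing names catalog prefix_)

-- ===== LEMMAS AND PROOFS =====

-- proof-side specification of B's rec(i, j): the same recurrence without the memo dict
def levT (l r : List Char) : Nat → Nat → Nat
  | 0, j => j
  | i + 1, 0 => i + 1
  | i + 1, j + 1 =>
      let cost := if l.getD i ' ' = r.getD j ' ' then 0 else 1
      min (levT l r i (j + 1) + 1) (min (levT l r (i + 1) j + 1) (levT l r i j + cost))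
  termination_by i j => (i, j)

-- a memo dict is correct when every stored value is the levT value of its key
def MemoOK (l r : List Char) (memo : PySem.Dict (Nat × Nat) Nat) : Prop :=
  ∀ p v, memo.get? p = some v → v = levT l r p.1 p.2

theorem levM_eq_levT (l r : List Char) :
    ∀ (i : Nat), ∀ (j : Nat) (memo : PySem.Dict (Nat × Nat) Nat), MemoOK l r memo →
      (levM l r i j memo).1 = levT l r i j ∧ MemoOK l r (levM l r i j memo).2 := by
  intro i
  induction i with
  | zero => intro j memo h; rw [levM]; exact ⟨by simp [levT], h⟩
  | succ i ihi =>
      intro j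
      induction j with
      | zero => intro memo h; rw [levM]; exact ⟨by simp [levT], h⟩
      | succ j ihj =>
          intro memo h
          rw [levM]
          cases hm : memo.get? (i + 1, j + 1) with
          | some v =>
              exact ⟨(h (i + 1, j + 1) v hm).symm ▸ rfl, h⟩
          | none =>
              obtain ⟨ha1, ha2⟩ := ihi (j + 1) memo h
              obtain ⟨hb1, hb2⟩ := ihj ((levM l r i (j + 1) memo).2) ha2
              obtain ⟨hc1, hc2⟩ :=
                ihi j ((levM l r (i + 1) j (levM l r i (j + 1) memo).2).2) hb2
              have hval : min ((levM l r i (j + 1) memo).1 + 1)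
                  (min ((levM l r (i + 1) j (levM l r i (j + 1) memo).2).1 + 1)
                    ((levM l r i j (levM l r (i + 1) j (levM l r i (j + 1) memo).2).2).1 +
                      if l.getD i ' ' = r.getD j ' ' then 0 else 1))
                  = levT l r (i + 1) (j + 1) := by
                rw [ha1, hb1, hc1]
                conv_rhs => rw [levT]
              refine ⟨hval, ?_⟩
              intro p w hw
              rw [PySem.Dict.get?_insert] at hw
              by_cases hp : p = (i + 1, j + 1)
              · rw [if_pos hp] at hw
                cases hw
                rw [hp]
                simpa using hval
              · rw [if_neg hp] at hw
                exact hc2 p w hw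


-- row i of A's DP table, expressed through B's recursion
def rowT (l r : List Char) (i : Nat) : List Nat :=
  (List.range (r.length + 1)).map (levT l r i)

theorem length_rowT (l r : List Char) (i : Nat) : (rowT l r i).length = r.length + 1 := by
  simp [rowT]

theorem getD_rowT (l r : List Char) (i j : Nat) (hj : j ≤ r.length) :
    (rowT l r i).getD j 0 = levT l r i j := by
  rw [List.getD_eq_getElem?_getD]
  simp [rowT, List.getElem?_map, List.getElem?_range (by omega : j < r.length + 1)]

theorem innerA_rowT (l r : List Char) (i : Nat) :
    ∀ (rs : List Char) (j : Nat), r.drop j = rs → j + rs.length = r.length →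
    rs.foldl (stepA (rowT l r i) (l.getD i ' ')) ((rowT l r (i + 1)).take (j + 1), j + 1)
      = (rowT l r (i + 1), r.length + 1) := by
  intro rs
  induction rs with
  | nil =>
      intro j hdrop hlen
      simp only [List.length_nil, Nat.add_zero] at hlen
      subst hlen
      rw [List.take_of_length_le (by rw [length_rowT])]
      simp
  | cons cr rs' ih =>
      intro j hdrop hlen
      have hj : j < r.length := by simp at hlen; omega
      have hcr : r.getD j ' ' = cr := by
        have h1 : (r.drop j)[0]? = some cr := by rw [hdrop]; rfl
        rw [List.getElem?_drop] at h1
        simp only [Nat.add_zero] at h1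
        simp [List.getD_eq_getElem?_getD, h1]
      have hdrop' : r.drop (j + 1) = rs' := by
        have h2 : (r.drop j).drop 1 = rs' := by rw [hdrop]; simp
        rwa [List.drop_drop] at h2
      rw [List.foldl_cons]
      have hstep : stepA (rowT l r i) (l.getD i ' ') ((rowT l r (i + 1)).take (j + 1), j + 1) cr
          = ((rowT l r (i + 1)).take (j + 2), j + 2) := by
        simp only [stepA]
        rw [Prod.mk.injEq]
        refine ⟨?_, rfl⟩
        -- the appended cell equals levT l r (i+1) (j+1)
        · have hins : (rowT l r i).getD (j + 1) 0 = levT l r i (j + 1) :=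
            getD_rowT l r i (j + 1) (by omega)
          have hdel : ((rowT l r (i + 1)).take (j + 1)).getD (j + 1 - 1) 0
              = levT l r (i + 1) j := by
            rw [List.getD_eq_getElem?_getD, List.getElem?_take]
            simp only [Nat.add_sub_cancel]
            rw [if_pos (by omega), ← List.getD_eq_getElem?_getD]
            exact getD_rowT l r (i + 1) j (by omega)
          have hsub : (rowT l r i).getD (j + 1 - 1) 0 = levT l r i j := by
            simpa using getD_rowT l r i j (by omega)
          rw [hins, hdel, hsub]
          have hget : (rowT l r (i + 1))[j + 1]? = some (levT l r (i + 1) (j + 1)) := by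
            simp [rowT, List.getElem?_map, List.getElem?_range (by omega : j + 1 < r.length + 1)]
          conv_rhs => rw [show j + 2 = (j + 1) + 1 by omega, List.take_add_one, hget]
          congr 1
          have : levT l r (i + 1) (j + 1)
              = min (levT l r i (j + 1) + 1)
                  (min (levT l r (i + 1) j + 1)
                    (levT l r i j + if l.getD i ' ' = r.getD j ' ' then 0 else 1)) := by
            rw [levT]
          rw [this, hcr]
          rcases eq_or_ne (l.getD i ' ') cr with h | h <;> simp [h]
      rw [hstep]
      have := ih (j + 1) hdrop' (by simp at hlen ⊢; omega)
      simpa using this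

theorem outerA_rowT (l r : List Char) :
    ∀ (ls : List Char) (i : Nat), l.drop i = ls → i + ls.length = l.length →
    ls.foldl (outerA r) (rowT l r i, i + 1) = (rowT l r l.length, l.length + 1) := by
  intro ls
  induction ls with
  | nil =>
      intro i hdrop hlen
      simp only [List.length_nil, Nat.add_zero] at hlen
      subst hlen; simp
  | cons cl ls' ih =>
      intro i hdrop hlen
      have hi : i < l.length := by simp at hlen; omega
      have hcl : l.getD i ' ' = cl := by
        have h1 : (l.drop i)[0]? = some cl := by rw [hdrop]; rfl
        rw [List.getElem?_drop] at h1
        simp only [Nat.add_zero] at h1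
        simp [List.getD_eq_getElem?_getD, h1]
      have hdrop' : l.drop (i + 1) = ls' := by
        have h2 : (l.drop i).drop 1 = ls' := by rw [hdrop]; simp
        rwa [List.drop_drop] at h2
      rw [List.foldl_cons]
      have htake1 : (rowT l r (i + 1)).take 1 = [i + 1] := by
        have h0 : (rowT l r (i + 1))[0]? = some (levT l r (i + 1) 0) := by
          simp [rowT]
        rw [List.take_one, List.head?_eq_getElem?, h0]
        simp [levT]
      have houter : outerA r (rowT l r i, i + 1) cl = (rowT l r (i + 1), i + 2) := by
        simp only [outerA]
        have := innerA_rowT l r i r 0 (by simp) (by simp)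
        rw [hcl] at this
        simp only [Nat.zero_add, htake1] at this
        rw [this]
      rw [houter]
      have := ih (i + 1) hdrop' (by simp at hlen ⊢; omega)
      simpa using this

theorem levA_eq_levT (l r : List Char) :
    ((l.foldl (outerA r) (List.range (r.length + 1), 1)).1).getLast?.getD 0
      = levT l r l.length r.length := by
  have hrow0 : List.range (r.length + 1) = rowT l r 0 := by
    simp only [rowT]
    rw [List.map_congr_left (g := id) (fun j _ => by simp [levT]), List.map_id]
  rw [hrow0]
  have := outerA_rowT l r l 0 (by simp) (by simp)
  simp only [Nat.zero_add] at this
  rw [this]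
  have : (rowT l r l.length).getLast? = some (levT l r l.length r.length) := by
    rw [List.getLast?_eq_getElem?, length_rowT]
    simp [rowT]
  rw [this]; rfl

theorem levenshteinA_eq (left right : String) :
    levenshteinA left right = levenshteinB left right := by
  simp only [levenshteinA, levenshteinB]
  split_ifs <;> first
    | rfl
    | exact (levA_eq_levT _ _).trans
        (levM_eq_levT _ _ _ _ PySem.Dict.empty (by intro p v hv; simp [PySem.Dict.get?_empty] at hv)).1.symm

theorem suggestionsA_eq (target : String) (candidates : List String) (limit : Nat) :
    suggestionsA target candidates limit = suggestionsB target candidates limit := by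
  simp only [suggestionsA, suggestionsB, levenshteinA_eq]

theorem foldl_append_singleton {α β : Type} (g : α → β) :
    ∀ (xs : List α) (acc : List β),
    xs.foldl (fun acc x => acc ++ [g x]) acc = acc ++ xs.map g := by
  intro xs
  induction xs with
  | nil => simp
  | cons x xs ih => intro acc; simp [ih]

-- ===== VERDICT (by name: the statement is the Claim_ definition above) =====
theorem format_missing_spec : Claim_equal_format_missing := by
  intro names catalog prefix_ _
  unfold Spec_format_missing format_missing format_missing_alt
  rw [foldl_append_singleton]
  simp only [List.nil_append, describeB, suggestionsA_eq]
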